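-- pv_equiv track=rewrite | github.com/Quuxplusone/TNT | python-tnt/godelize_mu.py | godel_number
-- ===== SOURCE A (Python) =====
-- def godel_number(s):
--     n = 0
--     for ch in s:
--         if ch == 'M':
--             n = 10*n + 3
--         elif ch == 'I':
--             n = 10*n + 1
--         elif ch == 'U':
--             n = 10*n + 0
--         else:
--             assert False
--     return n
-- ===== SOURCE B (Python) =====
-- def godel_number(s):
--     val = {'M': 3, 'I': 1, 'U': 0}
--     total = 0
--     place = 1
--     for ch in reversed(s):
--         assert ch in val
--         total += val[ch] * place
--         place *= 10
--     return total
-- ===== Notes on version B (the rewrite author's own statement) =====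
-- stated objective: alternative
-- what changed: B walks the string right-to-left accumulating digit*place with an explicit place-value counter instead of A's left-to-right Horner accumulation (10*n + digit), and reads the digit from a lookup table instead of an if/elif chain.
import Mathlib
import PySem

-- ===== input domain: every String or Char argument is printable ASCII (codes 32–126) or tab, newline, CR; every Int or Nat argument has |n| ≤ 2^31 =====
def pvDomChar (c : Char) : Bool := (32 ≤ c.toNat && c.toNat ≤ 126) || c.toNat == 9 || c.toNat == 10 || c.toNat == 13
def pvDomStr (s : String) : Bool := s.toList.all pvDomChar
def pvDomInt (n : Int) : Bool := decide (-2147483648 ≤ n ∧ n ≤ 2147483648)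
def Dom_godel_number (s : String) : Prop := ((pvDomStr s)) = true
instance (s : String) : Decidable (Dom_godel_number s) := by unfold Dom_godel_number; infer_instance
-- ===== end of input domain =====

-- B replaces A's left-to-right Horner accumulation by a right-to-left place-value sum with a digit table (objective: alternative).
-- Both raise AssertionError on characters outside 'MIU'; Pre_ excludes exactly those inputs.


-- ===== PORT A =====
-- A's loop: n = 10*n + digit per character; the else branch is 'assert False' (Python raises,
-- excluded by Pre_), ported as keeping n unchanged.
def godel_number (s : String) : Int :=
  s.toList.foldl (fun n ch =>
    if ch = 'M' then 10 * n + 3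
    else if ch = 'I' then 10 * n + 1
    else if ch = 'U' then 10 * n + 0
    else n) 0

-- ===== PORT B =====
-- digit table val; KeyError/assert on other characters is excluded by Pre_, ported as 0.
def gnVal (ch : Char) : Int :=
  if ch = 'M' then 3 else if ch = 'I' then 1 else 0

-- B's loop over reversed(s) with state (total, place)
def godel_number_alt (s : String) : Int :=
  (s.toList.reverse.foldl (fun (st : Int × Int) ch =>
    (st.1 + gnVal ch * st.2, st.2 * 10)) (0, 1)).1

-- ===== PRECONDITION & SPEC =====
-- Pre_ excludes strings with a character outside 'MIU', on which both Pythons raise AssertionError.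
def Pre_godel_number (s : String) : Prop :=
  s.toList.all (fun ch => ch == 'M' || ch == 'I' || ch == 'U') = true
instance (s : String) : Decidable (Pre_godel_number s) := by unfold Pre_godel_number; infer_instance

def pvWitness_godel_number : String := "MIU"

def Spec_godel_number (s : String) (out : Int) : Prop := out = godel_number_alt s
instance (s : String) (out : Int) : Decidable (Spec_godel_number s out) := by unfold Spec_godel_number; infer_instance

-- ===== CLAIM (what is proved, stated in full; the proofs are below) =====
def Claim_equal_godel_number : Prop :=
  ∀ (s : String), Dom_godel_number s → Pre_godel_number s → Spec_godel_number s (godel_number s)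

-- ===== LEMMAS AND PROOFS =====

-- rev_val r: value of a digit list with least significant digit first
def gnRevVal : List Char → Int
  | [] => 0
  | c :: r => gnVal c + 10 * gnRevVal r

theorem gnB_foldl (r : List Char) (t p : Int) :
    (r.foldl (fun (st : Int × Int) ch => (st.1 + gnVal ch * st.2, st.2 * 10)) (t, p)).1
      = t + p * gnRevVal r := by
  induction r generalizing t p with
  | nil => simp [gnRevVal]
  | cons c r ih => simp [List.foldl, gnRevVal, ih]; ring

theorem gnRevVal_append (r : List Char) (c : Char) :
    gnRevVal (r ++ [c]) = gnRevVal r + gnVal c * 10 ^ r.length := by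
  induction r with
  | nil => simp [gnRevVal]
  | cons d r ih => simp [gnRevVal, ih]; ring

theorem gnA_foldl (l : List Char) (h : ∀ ch ∈ l, ch = 'M' ∨ ch = 'I' ∨ ch = 'U') (n : Int) :
    l.foldl (fun n ch =>
      if ch = 'M' then 10 * n + 3
      else if ch = 'I' then 10 * n + 1
      else if ch = 'U' then 10 * n + 0
      else n) n = n * 10 ^ l.length + gnRevVal l.reverse := by
  induction l generalizing n with
  | nil => simp [gnRevVal]
  | cons c l ih =>
    have hc := h c (List.mem_cons_self ..)
    have hrest : ∀ ch ∈ l, ch = 'M' ∨ ch = 'I' ∨ ch = 'U' :=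
      fun ch hm => h ch (List.mem_cons_of_mem _ hm)
    have hstep : (if c = 'M' then 10 * n + 3
        else if c = 'I' then 10 * n + 1
        else if c = 'U' then 10 * n + 0
        else n) = 10 * n + gnVal c := by
      rcases hc with h | h | h <;> simp [h, gnVal]
    simp only [List.foldl_cons, hstep, ih hrest, List.reverse_cons, gnRevVal_append,
      List.length_cons, List.length_reverse]
    ring

-- ===== VERDICT (by name: the statement is the Claim_ definition above) =====
theorem godel_number_spec : Claim_equal_godel_number := by
  intro s _ hpre
  have hpre' : ∀ ch ∈ s.toList, ch = 'M' ∨ ch = 'I' ∨ ch = 'U' := by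
    intro ch hm
    have := List.all_eq_true.mp hpre ch hm
    simpa [or_assoc] using this
  unfold Spec_godel_number godel_number godel_number_alt
  rw [gnA_foldl s.toList hpre' 0, gnB_foldl]
  ring
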